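-- pv_equiv track=rewrite | github.com/nv-action/vllm-benchmarks | .github/workflows/scripts/bisect_helper.py | _parse_block_scalar
-- ===== SOURCE A (Python) =====
-- def _line_indent(line: str) -> int:
--     return len(line) - len(line.lstrip(" "))
--
-- def _parse_block_scalar(lines: list[str], start: int, indent: int) -> tuple[str, int]:
--     collected: list[str] = []
--     i = start
--     while i < len(lines):
--         raw = lines[i]
--         stripped = raw.strip()
--         current_indent = _line_indent(raw)
--         if stripped == "":
--             collected.append("")
--             i += 1
--             continue
--         if current_indent < indent:
--             break
--         collected.append(raw[indent:])
--         i += 1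
--     return "\n".join(collected).rstrip(), i
-- ===== SOURCE B (Python) =====
-- def _line_indent(line: str) -> int:
--     return len(line) - len(line.lstrip(" "))
--
-- def _parse_block_scalar(lines: list[str], start: int, indent: int) -> tuple[str, int]:
--     n = len(lines)
--     i = next((j for j in range(start, n)
--               if lines[j].strip() and _line_indent(lines[j]) < indent),
--              max(start, n))
--     collected = ["" if not lines[j].strip() else lines[j][indent:]
--                  for j in range(start, i)]
--     return "\n".join(collected).rstrip(), i
-- ===== Notes on version B (the rewrite author's own statement) =====
-- stated objective: simpler
-- what changed: B splits A's single interleaved while-loop-with-accumulator into boundary detection (a generator search for the first non-blank line dedented below `indent`) followed by a list comprehension extracting the block's content.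
import Mathlib
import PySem

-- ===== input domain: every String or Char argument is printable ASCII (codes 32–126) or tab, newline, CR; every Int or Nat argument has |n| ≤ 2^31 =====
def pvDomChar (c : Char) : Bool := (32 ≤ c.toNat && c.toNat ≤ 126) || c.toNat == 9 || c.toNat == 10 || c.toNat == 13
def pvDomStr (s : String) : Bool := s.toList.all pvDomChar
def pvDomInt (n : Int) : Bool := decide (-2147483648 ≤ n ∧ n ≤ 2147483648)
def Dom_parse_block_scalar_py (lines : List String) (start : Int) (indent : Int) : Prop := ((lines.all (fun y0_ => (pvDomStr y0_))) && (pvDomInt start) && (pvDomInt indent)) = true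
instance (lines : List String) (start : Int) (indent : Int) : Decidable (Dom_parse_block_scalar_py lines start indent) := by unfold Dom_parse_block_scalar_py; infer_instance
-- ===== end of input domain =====

-- B separates boundary detection (first non-blank line dedented below `indent`) from content
-- extraction (one comprehension over the block) instead of interleaving them in A's single
-- while-loop with an accumulator; objective: simpler.

-- ===== PORT A =====
-- port of _line_indent: len(line) - len(line.lstrip(" ")); lstrip(" ") (strip ONLY spaces) is
-- ported by hand as dropWhile (· == ' ') on the character list — exact for every string.
def line_indent_py (line : String) : Int :=
  PySem.Str.len line - ((line.toList.dropWhile (· == ' ')).length : Int)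

-- the while-loop of A: state (collected, i); lines[i] via pyGetD (under Pre_ the index is
-- always in range, so the default is never read)
def parse_block_scalar_go (lines : List String) (indent : Int) (i : Int)
    (collected : List String) : List String × Int :=
  if _h : i < (lines.length : Int) then
    let raw := PySem.List.pyGetD lines i ""
    let stripped := PySem.Str.strip raw
    let current_indent := line_indent_py raw
    if stripped == "" then
      parse_block_scalar_go lines indent (i + 1) (collected ++ [""])
    else if current_indent < indent then
      (collected, i)
    else
      parse_block_scalar_go lines indent (i + 1) (collected ++ [PySem.Str.slice raw (some indent) none])
  else (collected, i)
termination_by ((lines.length : Int) - i).toNat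
decreasing_by all_goals omega

def parse_block_scalar_py (lines : List String) (start : Int) (indent : Int) : String × Int :=
  let r := parse_block_scalar_go lines indent start []
  (PySem.Str.rstrip (PySem.Str.join "\n" r.1), r.2)

-- ===== PORT B =====
-- the boundary predicate of B: a non-blank line indented less than `indent`
def parse_block_scalar_stop (lines : List String) (indent : Int) (j : Int) : Bool :=
  let raw := PySem.List.pyGetD lines j ""
  PySem.Str.strip raw != "" && decide (line_indent_py raw < indent)

def parse_block_scalar_py_alt (lines : List String) (start : Int) (indent : Int) : String × Int :=
  let n : Int := lines.length
  let i : Int := ((PySem.List.pyRange start n 1).find? (parse_block_scalar_stop lines indent)).getD (max start n)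
  let collected : List String := (PySem.List.pyRange start i 1).map (fun j =>
    let raw := PySem.List.pyGetD lines j ""
    if PySem.Str.strip raw == "" then "" else PySem.Str.slice raw (some indent) none)
  (PySem.Str.rstrip (PySem.Str.join "\n" collected), i)

-- ===== PRECONDITION & SPEC =====
-- Pre_ excludes exactly the inputs on which the Python A raises IndexError: start < -len(lines)
-- (then lines[start] is out of range on the first iteration). Everywhere A returns, B matches.
def Pre_parse_block_scalar_py (lines : List String) (start : Int) (indent : Int) : Prop :=
  -(lines.length : Int) ≤ start
instance (lines : List String) (start : Int) (indent : Int) : Decidable (Pre_parse_block_scalar_py lines start indent) := by unfold Pre_parse_block_scalar_py; infer_instance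

def pvWitness_parse_block_scalar_py : List String × Int × Int := (["a:", "  b", "  c", "d"], 1, 2)

def Spec_parse_block_scalar_py (lines : List String) (start : Int) (indent : Int) (out : String × Int) : Prop := out = parse_block_scalar_py_alt lines start indent
instance (lines : List String) (start : Int) (indent : Int) (out : String × Int) : Decidable (Spec_parse_block_scalar_py lines start indent out) := by unfold Spec_parse_block_scalar_py; infer_instance

-- ===== CLAIM (what is proved, stated in full; the proofs are below) =====
def Claim_equal_parse_block_scalar_py : Prop := ∀ (lines : List String) (start : Int) (indent : Int), Dom_parse_block_scalar_py lines start indent → Pre_parse_block_scalar_py lines start indent → Spec_parse_block_scalar_py lines start indent (parse_block_scalar_py lines start indent)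

-- ===== LEMMAS AND PROOFS =====

-- the end index B computes when the scan begins at i (for i ≤ n the default max is n)
def pbsEnd (lines : List String) (indent : Int) (i : Int) : Int :=
  ((PySem.List.pyRange i (lines.length : Int) 1).find? (parse_block_scalar_stop lines indent)).getD (lines.length : Int)

-- the per-line mapping B applies to the block's lines
def pbsLine (lines : List String) (indent : Int) (j : Int) : String :=
  let raw := PySem.List.pyGetD lines j ""
  if PySem.Str.strip raw == "" then "" else PySem.Str.slice raw (some indent) none

theorem pbsEnd_bounds (lines : List String) (indent : Int) (i : Int)
    (hi : i ≤ (lines.length : Int)) :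
    i ≤ pbsEnd lines indent i ∧ pbsEnd lines indent i ≤ (lines.length : Int) := by
  unfold pbsEnd
  cases hf : (PySem.List.pyRange i (lines.length : Int) 1).find? (parse_block_scalar_stop lines indent) with
  | none => simp [hi]
  | some j =>
    have hm := List.mem_of_find?_eq_some hf
    rw [PySem.List.mem_pyRange_one] at hm
    simp [hm.1, le_of_lt hm.2]

theorem pbsEnd_cons_true (lines : List String) (indent : Int) (i : Int)
    (hlt : i < (lines.length : Int))
    (h : parse_block_scalar_stop lines indent i = true) :
    pbsEnd lines indent i = i := by
  unfold pbsEnd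
  rw [PySem.List.pyRange_one_cons hlt]
  simp [List.find?, h]

theorem pbsEnd_cons_false (lines : List String) (indent : Int) (i : Int)
    (hlt : i < (lines.length : Int))
    (h : parse_block_scalar_stop lines indent i = false) :
    pbsEnd lines indent i = pbsEnd lines indent (i + 1) := by
  unfold pbsEnd
  rw [PySem.List.pyRange_one_cons hlt]
  simp [List.find?, h]

-- main invariant: A's loop from index i with accumulator acc produces exactly acc followed by
-- B's per-line images of the block [i, pbsEnd i), and stops at pbsEnd i
theorem go_eq (lines : List String) (indent : Int) :
    ∀ (k : Nat) (i : Int) (acc : List String), i ≤ (lines.length : Int) →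
      ((lines.length : Int) - i).toNat = k →
      parse_block_scalar_go lines indent i acc =
        (acc ++ (PySem.List.pyRange i (pbsEnd lines indent i) 1).map (pbsLine lines indent),
         pbsEnd lines indent i) := by
  intro k
  induction k with
  | zero =>
    intro i acc hi hk
    have hin : i = (lines.length : Int) := by omega
    subst hin
    rw [parse_block_scalar_go]
    have he : pbsEnd lines indent (lines.length : Int) = (lines.length : Int) := by
      unfold pbsEnd
      rw [PySem.List.pyRange_one_eq_nil le_rfl]
      simp
    simp [he, PySem.List.pyRange_one_eq_nil le_rfl]
  | succ k ih =>
    intro i acc hi hk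
    have hlt : i < (lines.length : Int) := by omega
    rw [parse_block_scalar_go]
    simp only [hlt, dif_pos]
    by_cases hs : PySem.Str.strip (PySem.List.pyGetD lines i "") == ""
    · -- blank line: falls through in both versions
      have hstop : parse_block_scalar_stop lines indent i = false := by
        unfold parse_block_scalar_stop
        simp only [Bool.and_eq_false_iff]
        left
        simpa using hs
      have he := pbsEnd_cons_false lines indent i hlt hstop
      have hb := pbsEnd_bounds lines indent (i + 1) (by omega)
      have hrec := ih (i + 1) (acc ++ [""]) (by omega) (by omega)
      simp only [hs, if_pos]
      rw [hrec, he]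
      have hcons : PySem.List.pyRange i (pbsEnd lines indent (i + 1)) 1 =
          i :: PySem.List.pyRange (i + 1) (pbsEnd lines indent (i + 1)) 1 :=
        PySem.List.pyRange_one_cons (by omega)
      rw [hcons]
      simp [pbsLine, (by simpa using hs : PySem.Str.strip (PySem.List.pyGetD lines i "") = "")]
    · by_cases hc : line_indent_py (PySem.List.pyGetD lines i "") < indent
      · -- dedented non-blank line: the boundary
        have hstop : parse_block_scalar_stop lines indent i = true := by
          unfold parse_block_scalar_stop
          simp only [Bool.and_eq_true, bne_iff_ne, ne_eq, decide_eq_true_eq]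
          exact ⟨by simpa using hs, hc⟩
        have he := pbsEnd_cons_true lines indent i hlt hstop
        simp [hs, hc, he, PySem.List.pyRange_one_eq_nil (le_refl i)]
      · -- content line
        have hstop : parse_block_scalar_stop lines indent i = false := by
          unfold parse_block_scalar_stop
          simp only [Bool.and_eq_false_iff, decide_eq_false_iff_not]
          right
          exact hc
        have he := pbsEnd_cons_false lines indent i hlt hstop
        have hb := pbsEnd_bounds lines indent (i + 1) (by omega)
        have hrec := ih (i + 1) (acc ++ [PySem.Str.slice (PySem.List.pyGetD lines i "") (some indent) none]) (by omega) (by omega)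
        simp only [hs, hc, if_false]
        rw [hrec, he]
        have hcons : PySem.List.pyRange i (pbsEnd lines indent (i + 1)) 1 =
            i :: PySem.List.pyRange (i + 1) (pbsEnd lines indent (i + 1)) 1 :=
          PySem.List.pyRange_one_cons (by omega)
        rw [hcons]
        have hs' : ¬ PySem.Str.strip (PySem.List.pyGetD lines i "") = "" := by simpa using hs
        simp [pbsLine, hs']

-- ===== VERDICT (by name: the statement is the Claim_ definition above) =====
theorem parse_block_scalar_py_spec : Claim_equal_parse_block_scalar_py := by
  intro lines start indent _hdom _hpre
  unfold Spec_parse_block_scalar_py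
  unfold parse_block_scalar_py parse_block_scalar_py_alt
  by_cases hle : start ≤ (lines.length : Int)
  · -- the scan runs from start; the default of B's search is n
    have hmax : max start (lines.length : Int) = (lines.length : Int) := by omega
    have h := go_eq lines indent ((lines.length : Int) - start).toNat start [] hle rfl
    rw [h]
    simp only [hmax]
    rfl
  · -- start past the end: A's loop body never runs; B's range is empty and the default is start
    have hmax : max start (lines.length : Int) = start := by omega
    rw [parse_block_scalar_go]
    simp only [dif_neg (by omega : ¬ start < (lines.length : Int))]
    rw [PySem.List.pyRange_one_eq_nil (by omega : (lines.length : Int) ≤ start)]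
    simp only [List.find?_nil, Option.getD_none, hmax]
    rw [PySem.List.pyRange_one_eq_nil (le_refl start)]
    simp
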